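-- pv_equiv track=rewrite | github.com/TronPaul/irc-pugbot | irc_pugbot/pug.py | need_highlander
-- ===== SOURCE A (Python) =====
-- CLASSES = ['scout', 'soldier', 'pyro', 'demoman', 'heavy', 'engineer', 'medic', 'sniper', 'spy']
--
-- def need_highlander(players):
--         class_count = {c: 2 for c in CLASSES}
--         captain_count = 2
--         for nick, (classes, captain) in players.items():
--             if captain and captain_count > 0:
--                 captain_count -= 1
--             for class_ in classes:
--                 if class_count[class_] > 0:
--                     class_count[class_] -= 1
--         class_count = {class_: count for class_, count in class_count.items() if count > 0}
--         return captain_count, class_count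
-- ===== SOURCE B (Python) =====
-- CLASSES = ['scout', 'soldier', 'pyro', 'demoman', 'heavy', 'engineer', 'medic', 'sniper', 'spy']
--
-- def need_highlander(players):
--     # class-major: for each slot kind, scan players subtracting capped matches, stopping
--     # as soon as the two slots are filled; no mutable per-class dict is maintained.
--     def slots_left(matches):
--         need = 2
--         for classes, captain in players.values():
--             need -= min(need, matches(classes, captain))
--             if need == 0:
--                 break
--         return need
--     captain_count = slots_left(lambda classes, captain: 1 if captain else 0)
--     class_count = {}
--     for c in CLASSES:
--         n = slots_left(lambda classes, captain: classes.count(c))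
--         if n:
--             class_count[c] = n
--     return captain_count, class_count
-- ===== Notes on version B (the rewrite author's own statement) =====
-- stated objective: alternative
-- what changed: Replaces A's player-major pass that mutates a capped per-class counter dict by a class-major strategy: one shared slots_left scanner is run per slot kind (captain, then each of the 9 classes), subtracting capped matches and breaking early once both slots are filled; no counter dict is maintained and the result dict is assembled afterwards.
import Mathlib
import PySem

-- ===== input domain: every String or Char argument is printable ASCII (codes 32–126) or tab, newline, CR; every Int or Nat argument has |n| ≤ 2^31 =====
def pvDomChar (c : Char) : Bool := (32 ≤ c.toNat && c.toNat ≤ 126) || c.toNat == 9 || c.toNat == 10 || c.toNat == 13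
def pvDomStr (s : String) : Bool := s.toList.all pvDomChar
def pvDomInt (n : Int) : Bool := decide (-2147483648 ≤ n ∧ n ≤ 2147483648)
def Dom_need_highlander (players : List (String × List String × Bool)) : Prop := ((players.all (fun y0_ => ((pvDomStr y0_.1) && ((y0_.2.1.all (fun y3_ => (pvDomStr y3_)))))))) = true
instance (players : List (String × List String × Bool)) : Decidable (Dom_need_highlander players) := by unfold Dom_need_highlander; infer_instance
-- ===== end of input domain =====

-- B replaces A's player-major pass over a mutable capped counter dict by a class-major strategy:
-- one shared slots_left scanner run per slot kind with an early break once both slots are filled.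
-- (players is a Python dict; modelled as an association list, return value only.)

def CLASSES : List String :=
  ["scout", "soldier", "pyro", "demoman", "heavy", "engineer", "medic", "sniper", "spy"]

-- ===== PORT A =====
-- step of 'for class_ in classes': 'class_count[class_]' would raise KeyError for a class not in
-- the dict; Pre_ excludes that, so 'getD c 0' is exact on the admitted inputs.
def aClassStep (d : PySem.Dict String Int) (c : String) : PySem.Dict String Int :=
  if d.getD c 0 > 0 then d.insert c (d.getD c 0 - 1) else d

def aPlayerStep (st : PySem.Dict String Int × Int) (p : String × List String × Bool) :
    PySem.Dict String Int × Int :=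
  let cap := if p.2.2 && decide (st.2 > 0) then st.2 - 1 else st.2
  let d := p.2.1.foldl aClassStep st.1
  (d, cap)

def need_highlander (players : List (String × List String × Bool)) : Int × (List (String × Int)) :=
  let class_count := CLASSES.foldl (fun d c => d.insert c 2) PySem.Dict.empty
  let st := players.foldl aPlayerStep (class_count, 2)
  -- final dict comprehension: filter of the items, keys already unique
  (st.2, st.1.items.filter (fun kv => kv.2 > 0))

-- ===== PORT B =====
-- slots_left's loop with its 'break' once need hits 0, as structural recursion
def slotsLeftGo (mtch : List String → Bool → Int) :
    List (String × List String × Bool) → Int → Int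
  | [], need => need
  | p :: t, need =>
    let need' := need - min need (mtch p.2.1 p.2.2)
    if need' = 0 then need' else slotsLeftGo mtch t need'

def need_highlander_alt (players : List (String × List String × Bool)) : Int × (List (String × Int)) :=
  let captain_count := slotsLeftGo (fun _ captain => if captain then 1 else 0) players 2
  let class_count := CLASSES.foldl (fun acc c =>
      let n := slotsLeftGo (fun classes _ => (PySem.List.count classes c : Int)) players 2
      if n ≠ 0 then acc ++ [(c, n)] else acc) []
  (captain_count, class_count)

-- ===== PRECONDITION & SPEC =====
-- Pre_ excludes exactly the inputs where some picked class is outside CLASSES: there A raises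
-- KeyError, so A returns no value.
def Pre_need_highlander (players : List (String × List String × Bool)) : Prop :=
  ∀ p ∈ players, ∀ c ∈ p.2.1, c ∈ CLASSES
instance (players : List (String × List String × Bool)) : Decidable (Pre_need_highlander players) := by
  unfold Pre_need_highlander; infer_instance

def pvWitness_need_highlander : (List (String × List String × Bool)) :=
  [("alice", (["scout", "medic"], true)), ("bob", (["scout"], false))]

def Spec_need_highlander (players : List (String × List String × Bool)) (out : Int × (List (String × Int))) : Prop := out = need_highlander_alt players
instance (players : List (String × List String × Bool)) (out : Int × (List (String × Int))) : Decidable (Spec_need_highlander players out) := by unfold Spec_need_highlander; infer_instance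

-- ===== CLAIM (what is proved, stated in full; the proofs are below) =====
def Claim_equal_need_highlander : Prop := ∀ (players : List (String × List String × Bool)), Dom_need_highlander players → Pre_need_highlander players → Spec_need_highlander players (need_highlander players)

-- ===== LEMMAS AND PROOFS =====

-- ----- A-side: the fold computes max 0 (2 - count) per class, max 0 (2 - #captains) -----

-- a dict whose items are CLASSES tagged with values g c
def mkmap (g : String → Int) : PySem.Dict String Int :=
  PySem.Dict.mk (CLASSES.map (fun c => (c, g c)))

lemma mkmap_congr {g h : String → Int} (H : ∀ c ∈ CLASSES, g c = h c) : mkmap g = mkmap h := by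
  unfold mkmap; congr 1
  exact List.map_congr_left (fun c hc => by rw [H c hc])

lemma keys_mkmap (g : String → Int) : (mkmap g).keys = CLASSES := by
  simp only [mkmap, PySem.Dict.keys_mk, List.map_map]
  exact List.map_id CLASSES

lemma getD_mkmap (g : String → Int) {x : String} (hx : x ∈ CLASSES) :
    (mkmap g).getD x 0 = g x := by
  apply PySem.Dict.getD_of_mem_items
  · simp only [mkmap]
    exact List.mem_map.2 ⟨x, hx, rfl⟩
  · rw [keys_mkmap]; decide

lemma insert_mkmap (g : String → Int) {x : String} (hx : x ∈ CLASSES) (v : Int) :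
    (mkmap g).insert x v = mkmap (fun c => if c = x then v else g c) := by
  apply PySem.Dict.ext
  rw [PySem.Dict.items_insert_of_contains]
  · simp only [mkmap, List.map_map]
    apply List.map_congr_left
    intro c _
    by_cases h : c = x <;> simp [h]
  · rw [PySem.Dict.contains_eq_decide_mem_keys, keys_mkmap]
    simpa using hx

lemma inner_fold (l : List String) (g : String → Int)
    (hl : ∀ c ∈ l, c ∈ CLASSES) (hg : ∀ c, 0 ≤ g c) :
    l.foldl aClassStep (mkmap g) = mkmap (fun c => max 0 (g c - l.count c)) := by
  induction l generalizing g with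
  | nil =>
    simp only [List.foldl_nil]
    refine mkmap_congr (fun c _ => ?_)
    have := hg c
    simp only [List.count_nil, Nat.cast_zero]
    omega
  | cons x t ih =>
    have hx : x ∈ CLASSES := hl x (List.mem_cons_self)
    have hstep : aClassStep (mkmap g) x = mkmap (fun c => if c = x then max 0 (g x - 1) else g c) := by
      unfold aClassStep
      rw [getD_mkmap g hx]
      by_cases h : g x > 0
      · rw [if_pos h, insert_mkmap g hx]
        congr 1; funext c
        by_cases hc : c = x <;> simp [hc] <;> omega
      · rw [if_neg h]
        unfold mkmap; congr 1
        apply List.map_congr_left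
        intro c _
        have := hg x
        by_cases hc : c = x <;> simp [hc] <;> omega
    rw [List.foldl_cons, hstep,
      ih _ (fun c hc => hl c (List.mem_cons_of_mem _ hc))
        (by intro c
            by_cases hc : c = x
            · rw [if_pos hc]; exact le_max_left _ _
            · rw [if_neg hc]; exact hg c)]
    refine mkmap_congr (fun c _ => ?_)
    by_cases hc : c = x
    · subst hc
      simp only [List.count_cons_self]
      push_cast; omega
    · rw [if_neg hc, List.count_cons_of_ne (Ne.symm hc)]

lemma outer_fold (players : List (String × List String × Bool)) (g : String → Int) (cap : Int)
    (hcl : ∀ p ∈ players, ∀ c ∈ p.2.1, c ∈ CLASSES)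
    (hg : ∀ c, 0 ≤ g c) (hcap : 0 ≤ cap) :
    players.foldl aPlayerStep (mkmap g, cap) =
      (mkmap (fun c => max 0 (g c - (players.flatMap (fun p => p.2.1)).count c)),
       max 0 (cap - (players.countP (fun p => p.2.2)))) := by
  induction players generalizing g cap with
  | nil =>
    simp only [List.foldl_nil, List.flatMap_nil, List.countP_nil, Nat.cast_zero,
      Prod.mk.injEq]
    constructor
    · refine mkmap_congr (fun c _ => ?_)
      have := hg c
      simp only [List.count_nil, Nat.cast_zero]
      omega
    · have := hcap; omega
  | cons p t ih =>
    have hp : ∀ c ∈ p.2.1, c ∈ CLASSES := hcl p (List.mem_cons_self)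
    have hcap1 : (if p.2.2 && decide (cap > 0) then cap - 1 else cap)
        = if p.2.2 then max 0 (cap - 1) else cap := by
      by_cases hb : p.2.2 <;> simp [hb] <;> omega
    have hstep : aPlayerStep (mkmap g, cap) p =
        (mkmap (fun c => max 0 (g c - p.2.1.count c)),
         if p.2.2 then max 0 (cap - 1) else cap) := by
      unfold aPlayerStep
      simp only
      rw [inner_fold p.2.1 g hp hg, hcap1]
    rw [List.foldl_cons, hstep,
      ih _ _ (fun q hq => hcl q (List.mem_cons_of_mem _ hq))
        (fun c => le_max_left _ _)
        (by by_cases hb : p.2.2 <;> simp [hb] <;> omega)]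
    simp only [Prod.mk.injEq]
    constructor
    · refine mkmap_congr (fun c _ => ?_)
      rw [List.flatMap_cons, List.count_append]
      push_cast; omega
    · simp only [List.countP_cons]
      by_cases hb : p.2.2 <;> simp [hb] <;> omega

lemma init_dict : CLASSES.foldl (fun d c => d.insert c 2) PySem.Dict.empty = mkmap (fun _ => 2) := by
  decide

-- ----- B-side: the early-exit scanner equals capped subtraction of the total -----

lemma slotsLeftGo_eq (m : List String → Bool → Int) (l : List (String × List String × Bool))
    (need : Int) (hneed : 0 ≤ need) (hm : ∀ p ∈ l, 0 ≤ m p.2.1 p.2.2) :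
    slotsLeftGo m l need = max 0 (need - (l.map (fun p => m p.2.1 p.2.2)).sum) := by
  induction l generalizing need with
  | nil => simp only [slotsLeftGo, List.map_nil, List.sum_nil]; omega
  | cons p t ih =>
    have hm0 : 0 ≤ m p.2.1 p.2.2 := hm p (List.mem_cons_self)
    have hS : 0 ≤ (t.map (fun p => m p.2.1 p.2.2)).sum :=
      List.sum_nonneg (by
        intro x hx
        obtain ⟨q, hq, rfl⟩ := List.mem_map.1 hx
        exact hm q (List.mem_cons_of_mem _ hq))
    simp only [slotsLeftGo, List.map_cons, List.sum_cons]
    split_ifs with h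
    · omega
    · rw [ih _ (by omega) (fun q hq => hm q (List.mem_cons_of_mem _ hq))]
      omega

lemma sum_captains (l : List (String × List String × Bool)) :
    (l.map (fun p => if p.2.2 then (1 : Int) else 0)).sum = (l.countP (fun p => p.2.2) : Int) := by
  induction l with
  | nil => simp
  | cons p t ih =>
    simp only [List.map_cons, List.sum_cons, List.countP_cons, ih]
    by_cases hb : p.2.2 <;> simp [hb] <;> omega

lemma sum_counts (l : List (String × List String × Bool)) (c : String) :
    (l.map (fun p => (PySem.List.count p.2.1 c : Int))).sum
      = ((l.flatMap (fun p => p.2.1)).count c : Int) := by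
  induction l with
  | nil => simp
  | cons p t ih =>
    simp only [List.map_cons, List.sum_cons, List.flatMap_cons, List.count_append,
      PySem.List.count_eq] at ih ⊢
    rw [ih]; push_cast; ring

lemma foldl_if_append {α β : Type} (p : α → Prop) [DecidablePred p] (f : α → β)
    (l : List α) (acc : List β) :
    l.foldl (fun a x => if p x then a ++ [f x] else a) acc
      = acc ++ (l.filter (fun x => decide (p x))).map f := by
  induction l generalizing acc with
  | nil => simp
  | cons x t ih =>
    simp only [List.foldl_cons, List.filter_cons]
    by_cases h : p x
    · rw [if_pos h, ih]; simp [h, List.append_assoc]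
    · rw [if_neg h, ih]; simp [h]

theorem need_highlander_spec : Claim_equal_need_highlander := by
  intro players _ hpre
  unfold Spec_need_highlander
  simp only [need_highlander, need_highlander_alt]
  rw [init_dict, outer_fold players (fun _ => 2) 2 hpre (fun _ => by norm_num) (by norm_num)]
  have hgo : ∀ c, slotsLeftGo (fun classes _ => (PySem.List.count classes c : Int)) players 2
      = max 0 (2 - ((players.flatMap (fun p => p.2.1)).count c : Int)) := by
    intro c
    rw [slotsLeftGo_eq _ _ _ (by norm_num)
      (fun q _ => by simp [PySem.List.count_eq]), sum_counts]
  simp only [Prod.mk.injEq]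
  constructor
  · rw [slotsLeftGo_eq _ _ _ (by norm_num) (fun q _ => by by_cases hb : q.2.2 <;> simp [hb]),
      sum_captains]
  · simp only [mkmap]
    rw [foldl_if_append
      (p := fun c => slotsLeftGo (fun classes _ => (PySem.List.count classes c : Int)) players 2 ≠ 0)
      (f := fun c => (c, slotsLeftGo (fun classes _ => (PySem.List.count classes c : Int)) players 2))]
    simp only [List.filter_map, Function.comp_def, List.nil_append]
    have hpq : (fun c => decide ((max 0 ((2:Int) - ((players.flatMap (fun p => p.2.1)).count c : Int))) > 0))
        = fun c => decide (slotsLeftGo (fun classes _ => (PySem.List.count classes c : Int)) players 2 ≠ 0) := by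
      funext c
      rw [hgo c]
      simp only [decide_eq_decide]
      omega
    rw [hpq]
    refine List.map_congr_left (fun c hc => ?_)
    rw [hgo c]
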